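-- pv_equiv track=rewrite | github.com/python-advance/sem5-collections-Yalkinzsun | Вариативная самостоятельная работа/4.3.py | set_operations
-- ===== SOURCE A (Python) =====
-- def set_operations(lst, operation):
--   final_set = set()
--   if operation == 1:
--      for i in lst:
--        final_set.update(i)
--   elif operation == 2:
--      c = 0
--      for i in lst:
--        if c == 0:
--           final_set.update(lst[0])
--           c+=1
--        else:
--          final_set.intersection_update(i)
--   elif operation == 3:
--      c = 0
--      for i in lst:
--        if c == 0:
--           final_set.update(lst[0])
--           c+=1
--        else:
--          final_set.difference_update(i)
--   return final_set
-- ===== SOURCE B (Python) =====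
-- def set_operations(lst, operation):
--     sets = [set(i) for i in lst]
--     counts = {}
--     for s in sets:
--         for x in s:
--             counts[x] = counts.get(x, 0) + 1
--     if operation == 1:
--         return set(counts)
--     if not sets:
--         return set()
--     first = sets[0]
--     if operation == 2:
--         return {x for x in first if counts[x] == len(sets)}
--     if operation == 3:
--         return {x for x in first if counts[x] == 1}
--     return set()
-- ===== Notes on version B (the rewrite author's own statement) =====
-- stated objective: alternative
-- what changed: Replaces A's branch-per-operation mutation loops (update/intersection_update/difference_update with a step counter) by one pass that dedupes each iterable and builds a membership-frequency table, then answers every operation by a single filter over that table.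
import Mathlib
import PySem

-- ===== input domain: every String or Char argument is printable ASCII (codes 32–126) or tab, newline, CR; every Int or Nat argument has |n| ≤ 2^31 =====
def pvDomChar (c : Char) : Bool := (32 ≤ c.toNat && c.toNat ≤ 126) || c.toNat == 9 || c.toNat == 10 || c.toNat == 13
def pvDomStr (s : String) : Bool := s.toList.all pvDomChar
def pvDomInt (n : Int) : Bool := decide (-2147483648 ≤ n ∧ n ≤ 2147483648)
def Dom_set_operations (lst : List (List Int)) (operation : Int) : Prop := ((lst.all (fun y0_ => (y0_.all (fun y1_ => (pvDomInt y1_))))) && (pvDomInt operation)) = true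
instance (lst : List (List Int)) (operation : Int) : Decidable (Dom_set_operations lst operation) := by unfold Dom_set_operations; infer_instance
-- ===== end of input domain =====

-- B replaces A's per-operation mutation loops by one membership-frequency table over the
-- deduped iterables plus a single filter per operation (objective: alternative; same cost).

-- ===== PORT A =====
-- literal transliteration: final_set mutated by a loop; ops 2/3 carry the step counter c
def set_operations (lst : List (List Int)) (operation : Int) : List Int :=
  let final_set : PySem.Set Int := PySem.Set.empty
  if operation == 1 then
    lst.foldl (fun s i => PySem.Set.update s i) final_set
  else if operation == 2 then
    (lst.foldl (fun (p : PySem.Set Int × Int) i =>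
        if p.2 == 0 then (PySem.Set.update p.1 (lst.headD []), p.2 + 1)
        else (PySem.Set.inter p.1 i, p.2)) (final_set, 0)).1
  else if operation == 3 then
    (lst.foldl (fun (p : PySem.Set Int × Int) i =>
        if p.2 == 0 then (PySem.Set.update p.1 (lst.headD []), p.2 + 1)
        else (PySem.Set.diff p.1 i, p.2)) (final_set, 0)).1
  else final_set

-- ===== PORT B =====
def set_operations_alt (lst : List (List Int)) (operation : Int) : List Int :=
  let sets := lst.map (fun i => PySem.Set.ofList i)
  let counts : PySem.Dict Int Int :=
    sets.foldl (fun d s => s.foldl (fun d x => d.modify x 0 (· + 1)) d) PySem.Dict.empty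
  if operation == 1 then counts.keys
  else
    match sets with
    | [] => PySem.Set.empty
    | first :: _ =>
      if operation == 2 then
        first.filter (fun x => counts.getD x 0 == (sets.length : Int))
      else if operation == 3 then
        first.filter (fun x => counts.getD x 0 == 1)
      else PySem.Set.empty

-- ===== PRECONDITION & SPEC =====
def Spec_set_operations (lst : List (List Int)) (operation : Int) (out : List Int) : Prop := out = set_operations_alt lst operation
instance (lst : List (List Int)) (operation : Int) (out : List Int) : Decidable (Spec_set_operations lst operation out) := by unfold Spec_set_operations; infer_instance

-- ===== CLAIM (what is proved, stated in full; the proofs are below) =====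
def Claim_equal_set_operations : Prop := ∀ (lst : List (List Int)) (operation : Int), Dom_set_operations lst operation → Spec_set_operations lst operation (set_operations lst operation)

-- ===== LEMMAS AND PROOFS =====

-- a fold of update is update by the flattening
theorem pv_foldl_update (L : List (List Int)) (s : PySem.Set Int) :
    L.foldl (fun s i => PySem.Set.update s i) s = PySem.Set.update s L.flatten := by
  induction L generalizing s with
  | nil => simp [PySem.Set.update_nil]
  | cons h t ih => simp [PySem.Set.update_append, ih]

-- updating with a deduped list is updating with the list
theorem pv_update_ofList (i : List Int) (s : PySem.Set Int) :
    PySem.Set.update s (PySem.Set.ofList i) = PySem.Set.update s i := by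
  induction i using List.reverseRecOn with
  | nil => rfl
  | append_singleton xs x ih =>
    rw [PySem.Set.ofList_append_singleton, PySem.Set.update_append s xs [x]]
    by_cases hx : x ∈ PySem.Set.ofList xs
    · rw [PySem.Set.add_of_mem hx, ih]
      have hx' : x ∈ PySem.Set.update s xs :=
        (PySem.Set.mem_update s xs x).mpr (Or.inr ((PySem.Set.mem_ofList xs x).mp hx))
      rw [show PySem.Set.update (PySem.Set.update s xs) [x]
            = (PySem.Set.update s xs).add x from rfl, PySem.Set.add_of_mem hx']
    · have : PySem.Set.update s ((PySem.Set.ofList xs).add x)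
          = PySem.Set.update (PySem.Set.update s (PySem.Set.ofList xs)) [x] := by
        rw [PySem.Set.add_of_not_mem hx, PySem.Set.update_append]
      rw [this, ih]

-- the nested counting loop is the counter of the flattening
theorem pv_counts_eq (sets : List (List Int)) :
    sets.foldl (fun d s => s.foldl (fun d x => d.modify x 0 (· + 1)) d) PySem.Dict.empty
      = PySem.Dict.counter sets.flatten := by
  rw [PySem.Dict.counter_eq_foldl, List.foldl_flatten]

-- count of x in a deduped list is membership
theorem pv_count_ofList (i : List Int) (x : Int) :
    List.count x (PySem.Set.ofList i) = if x ∈ i then 1 else 0 := by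
  by_cases h : x ∈ i
  · simp [h]
  · simp [h, List.count_eq_zero.mpr (fun hm => h ((PySem.Set.mem_ofList i x).mp hm))]

-- count of x across the deduped lists = number of lists containing x
theorem pv_count_flatten (L : List (List Int)) (x : Int) :
    List.count x ((L.map (fun i => PySem.Set.ofList i)).flatten)
      = (L.filter (fun u => decide (x ∈ u))).length := by
  induction L with
  | nil => simp
  | cons h t ih =>
    rw [List.map_cons, List.flatten_cons, List.count_append, ih, pv_count_ofList,
      List.filter_cons]
    by_cases hx : x ∈ h
    · simp [hx]; omega
    · simp [hx]

-- the c-counter loop, once c = 1, is a plain fold of g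
theorem pv_fold_tail (g : PySem.Set Int → List Int → PySem.Set Int)
    (h0 : List Int) (T : List (List Int)) (s : PySem.Set Int) :
    (T.foldl (fun (p : PySem.Set Int × Int) i =>
        if p.2 == 0 then (PySem.Set.update p.1 h0, p.2 + 1)
        else (g p.1 i, p.2)) (s, 1)).1
      = T.foldl g s := by
  induction T generalizing s with
  | nil => rfl
  | cons u T ih => simpa using ih (g s u)

-- a fold of inter is a filter by membership in every list
theorem pv_foldl_inter (T : List (List Int)) (s : PySem.Set Int) :
    T.foldl (fun s i => PySem.Set.inter s i) s
      = s.filter (fun x => T.all (fun u => decide (x ∈ u))) := by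
  induction T generalizing s with
  | nil => simp
  | cons u T ih =>
    rw [List.foldl_cons, ih, PySem.Set.inter, List.filter_filter]
    exact List.filter_congr (fun x _ => by
      simp [List.all_cons, Bool.and_comm])

-- a fold of diff is a filter by non-membership in every list
theorem pv_foldl_diff (T : List (List Int)) (s : PySem.Set Int) :
    T.foldl (fun s i => PySem.Set.diff s i) s
      = s.filter (fun x => T.all (fun u => !decide (x ∈ u))) := by
  induction T generalizing s with
  | nil => simp
  | cons u T ih =>
    rw [List.foldl_cons, ih, PySem.Set.diff, List.filter_filter]
    exact List.filter_congr (fun x _ => by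
      simp [List.all_cons, Bool.and_comm])

-- ===== VERDICT (by name: the statement is the Claim_ definition above) =====
theorem set_operations_spec : Claim_equal_set_operations := by
  unfold Claim_equal_set_operations
  intro lst operation _
  unfold Spec_set_operations
  simp only [set_operations, set_operations_alt, pv_counts_eq]
  split_ifs with h1 h2 h3
  · -- union
    rw [PySem.Dict.keys_counter, ← PySem.Set.update_nil_left, ← pv_foldl_update,
      List.foldl_map]
    simp only [pv_update_ofList]
    rfl
  · -- intersection
    cases lst with
    | nil => rfl
    | cons h t =>
      rw [List.foldl_cons]
      simp only [List.headD_cons, beq_self_eq_true, if_true]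
      rw [show ((PySem.Set.empty : PySem.Set Int).update h, ((0 : Int) + 1))
            = (PySem.Set.ofList h, (1 : Int)) from by
          rw [← PySem.Set.update_nil_left]; rfl]
      rw [pv_fold_tail, pv_foldl_inter]
      refine (List.filter_congr (fun x hx => ?_)).symm
      have hxh : x ∈ h := (PySem.Set.mem_ofList h x).mp hx
      rw [Bool.eq_iff_iff]
      simp only [beq_iff_eq, PySem.Dict.getD_counter, pv_count_flatten, List.all_eq_true,
        decide_eq_true_eq, List.filter_cons, hxh, decide_true, if_true,
        List.length_cons, List.length_map]
      constructor
      · intro he u hu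
        have hle := List.length_filter_le (fun u => decide (x ∈ u)) t
        have hlen : (t.filter (fun u => decide (x ∈ u))).length = t.length := by omega
        simpa using List.length_filter_eq_length_iff.mp hlen u hu
      · intro hall
        have hlen : (t.filter (fun u => decide (x ∈ u))).length = t.length :=
          List.length_filter_eq_length_iff.mpr (fun u hu => by simpa using hall u hu)
        rw [hlen]
  · -- difference
    cases lst with
    | nil => rfl
    | cons h t =>
      rw [List.foldl_cons]
      simp only [List.headD_cons, beq_self_eq_true, if_true]
      rw [show ((PySem.Set.empty : PySem.Set Int).update h, ((0 : Int) + 1))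
            = (PySem.Set.ofList h, (1 : Int)) from by
          rw [← PySem.Set.update_nil_left]; rfl]
      rw [pv_fold_tail, pv_foldl_diff]
      refine (List.filter_congr (fun x hx => ?_)).symm
      have hxh : x ∈ h := (PySem.Set.mem_ofList h x).mp hx
      rw [Bool.eq_iff_iff]
      simp only [beq_iff_eq, PySem.Dict.getD_counter, pv_count_flatten, List.all_eq_true,
        Bool.not_eq_true', decide_eq_false_iff_not, List.filter_cons, hxh, decide_true,
        if_true, List.length_cons]
      constructor
      · intro he u hu
        have hlen : (t.filter (fun u => decide (x ∈ u))).length = 0 := by omega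
        have h0 := List.filter_eq_nil_iff.mp (List.length_eq_zero_iff.mp hlen) u hu
        simpa using h0
      · intro hall
        have hlen : t.filter (fun u => decide (x ∈ u)) = [] :=
          List.filter_eq_nil_iff.mpr (fun u hu => by simpa using hall u hu)
        simp [hlen]
  · -- any other operation
    cases lst with
    | nil => rfl
    | cons h t => rfl
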